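-- pv_equiv track=rewrite | github.com/Treadgold/Advent_2023 | problem2.py | collect_numbers
-- ===== SOURCE A (Python) =====
-- def find_numbers(line: str) -> list:
--     """
--     Find all occurrences of number words or digits in a line and return their positions.
--
--     :param line: The line of text to search.
--     :return: A list of tuples, each containing the number word or digit and its position in the line.
--     """
--
--     targets = ['one', 'two', 'three', 'four', 'five', 'six', 'seven', 'eight', 'nine', '1', '2', '3', '4', '5', '6', '7', '8', '9']
--     positions = []
--     for target in targets:
--         pos = line.find(target)
--         while pos != -1:
--             positions.append((target, pos))
--             pos = line.find(target, pos + 1)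
--     return sorted(positions, key=lambda x: x[1])  # Sort by position
--
-- def match_int(text: str) -> int:
--     # all this does is convert the text to an integer
--     if text == 'one' or text == '1':
--         return 1
--     elif text == 'two' or text == '2':
--         return 2
--     elif text == 'three' or text == '3':
--         return 3
--     elif text == 'four' or text == '4':
--         return 4
--     elif text == 'five' or text == '5':
--         return 5
--     elif text == 'six' or text == '6':
--         return 6
--     elif text == 'seven' or text == '7':
--         return 7
--     elif text == 'eight' or text == '8':
--         return 8
--     elif text == 'nine' or text == '9':
--         return 9
--     else:
--         return None
--
-- def collect_numbers(data: dict) -> list: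
--     # this function goes through each line in the input data dictionary
--     # and finds all candidates for numbers in the string
--     # then it sorts the candidates by position in the string
--     # and converts the first and last candidates to integers
--     # Then it appends them to a list
--     # which which it returns
--     numbers = []
--     for _, line in data.items():
--         candidates = find_numbers(line)
--         if candidates:
--             low = match_int(candidates[0][0])  # First element's number
--             high = match_int(candidates[-1][0])  # Last element's number
--             numbers.append(low * 10 + high)
--     return numbers
-- ===== SOURCE B (Python) =====
-- TOKENS = (('one', 1), ('two', 2), ('three', 3), ('four', 4), ('five', 5),
--           ('six', 6), ('seven', 7), ('eight', 8), ('nine', 9),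
--           ('1', 1), ('2', 2), ('3', 3), ('4', 4), ('5', 5),
--           ('6', 6), ('7', 7), ('8', 8), ('9', 9))
--
--
-- def _match_at(line, i):
--     # value of the number word or digit starting at index i, else None
--     for w, v in TOKENS:
--         if line.startswith(w, i):
--             return v
--     return None
--
--
-- def collect_numbers(data: dict) -> list:
--     # One direct scan per line instead of collecting and sorting all occurrences:
--     # the leftmost match gives the tens digit, the rightmost match the units digit.
--     numbers = []
--     for line in data.values():
--         n = len(line)
--         first = next((v for i in range(n) if (v := _match_at(line, i)) is not None), None)
--         last = next((v for i in reversed(range(n)) if (v := _match_at(line, i)) is not None), None)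
--         if first is not None and last is not None:
--             numbers.append(first * 10 + last)
--     return numbers
-- ===== Notes on version B (the rewrite author's own statement) =====
-- stated objective: simpler
-- what changed: Instead of running 18 repeated str.find scans per line, collecting every occurrence and sorting them by position, B scans each line's indices once from the left and once from the right, testing the 18 tokens by startswith at each index and stopping at the first hit, so no occurrence list and no sort exist.
import Mathlib
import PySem

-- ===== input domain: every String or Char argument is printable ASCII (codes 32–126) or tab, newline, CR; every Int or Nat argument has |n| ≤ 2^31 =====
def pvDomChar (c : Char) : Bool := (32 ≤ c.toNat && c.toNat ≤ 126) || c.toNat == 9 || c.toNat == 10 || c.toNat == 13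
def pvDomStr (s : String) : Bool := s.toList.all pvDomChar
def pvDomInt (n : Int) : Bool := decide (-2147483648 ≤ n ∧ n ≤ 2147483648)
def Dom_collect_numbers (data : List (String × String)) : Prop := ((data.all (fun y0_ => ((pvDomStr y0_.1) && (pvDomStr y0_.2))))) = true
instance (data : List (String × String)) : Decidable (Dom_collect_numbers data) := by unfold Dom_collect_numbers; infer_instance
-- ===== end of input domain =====

-- B collects no occurrence list and sorts nothing: per line it scans the indices once from the
-- left and once from the right, testing the 18 tokens by startswith, stopping at the first hit.
-- Neither program mutates its argument; the equivalence is about the return value.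

-- ===== PORT A =====
-- the 18 targets of find_numbers, in A's order
def targetsA : List (List Char) :=
  ["one".toList, "two".toList, "three".toList, "four".toList, "five".toList, "six".toList,
   "seven".toList, "eight".toList, "nine".toList,
   "1".toList, "2".toList, "3".toList, "4".toList, "5".toList, "6".toList, "7".toList,
   "8".toList, "9".toList]

-- the 'while pos != -1' loop of find_numbers; fuel = line.length + 1 bounds its iteration count
-- (each step strictly increases pos, which stays < line.length), so the fuel never runs out
def findLoopA (s t : List Char) : Nat → Int → List (List Char × Int)
  | 0, _ => []
  | fuel + 1, pos =>
      if pos = -1 then []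
      else (t, pos) :: findLoopA s t fuel (PySem.Chars.findFrom s t (pos + 1) none)

def find_numbersA (line : List Char) : List (List Char × Int) :=
  let positions :=
    targetsA.foldl (fun acc t => acc ++ findLoopA line t (line.length + 1) (PySem.Chars.find line t)) []
  PySem.List.sorted positions (fun x => x.2) false

-- match_int; Python's 'return None' branch becomes 'none'
def match_intA (text : List Char) : Option Int :=
  if text = "one".toList ∨ text = "1".toList then some 1
  else if text = "two".toList ∨ text = "2".toList then some 2
  else if text = "three".toList ∨ text = "3".toList then some 3
  else if text = "four".toList ∨ text = "4".toList then some 4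
  else if text = "five".toList ∨ text = "5".toList then some 5
  else if text = "six".toList ∨ text = "6".toList then some 6
  else if text = "seven".toList ∨ text = "7".toList then some 7
  else if text = "eight".toList ∨ text = "8".toList then some 8
  else if text = "nine".toList ∨ text = "9".toList then some 9
  else none

-- 'if candidates:' + candidates[0] / candidates[-1] become the double option match; the
-- '.getD 0' renders match_int's unreachable None case (its argument is always a target)
def collect_numbers (data : List (String × String)) : List Int :=
  data.foldl (fun numbers kv =>
    let candidates := find_numbersA kv.2.toList
    match PySem.List.pyGet? candidates 0, PySem.List.pyGet? candidates (-1) with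
    | some c0, some cl =>
        numbers ++ [(match_intA c0.1).getD 0 * 10 + (match_intA cl.1).getD 0]
    | _, _ => numbers) []

-- ===== PORT B =====
def tokensB : List (List Char × Int) :=
  [("one".toList, 1), ("two".toList, 2), ("three".toList, 3), ("four".toList, 4),
   ("five".toList, 5), ("six".toList, 6), ("seven".toList, 7), ("eight".toList, 8),
   ("nine".toList, 9),
   ("1".toList, 1), ("2".toList, 2), ("3".toList, 3), ("4".toList, 4), ("5".toList, 5),
   ("6".toList, 6), ("7".toList, 7), ("8".toList, 8), ("9".toList, 9)]

-- the 'for w, v in TOKENS' loop of _match_at; line.startswith(w, i) = startswith of line[i:]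
def wordScanB : List (List Char × Int) → List Char → Option Int
  | [], _ => none
  | (w, v) :: rest, u => if PySem.Chars.startswith u w then some v else wordScanB rest u

def matchAtB (line : List Char) (i : Nat) : Option Int := wordScanB tokensB (line.drop i)

-- next((... for i in range(n) ...), None) is findSome? over the range; reversed(range(n)) is its reverse
def collect_numbers_alt (data : List (String × String)) : List Int :=
  data.foldl (fun numbers kv =>
    let s := kv.2.toList
    let first := (List.range s.length).findSome? (matchAtB s)
    let last := (List.range s.length).reverse.findSome? (matchAtB s)
    match first with
    | some f =>
        match last with
        | some l => numbers ++ [f * 10 + l]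
        | none => numbers
    | none => numbers) []

-- ===== PRECONDITION & SPEC =====
-- A's parameter is a Python dict, which cannot hold duplicate keys: an association list with a
-- repeated key encodes no dict A could receive (dict(...) would collapse such entries), so those
-- lists are excluded; the values themselves are unconstrained.
def Pre_collect_numbers (data : List (String × String)) : Prop := (data.map Prod.fst).Nodup
instance (data : List (String × String)) : Decidable (Pre_collect_numbers data) := by
  unfold Pre_collect_numbers; infer_instance

def pvWitness_collect_numbers : (List (String × String)) :=
  [("a", "two1nine"), ("b", "xyz"), ("c", "eightwothree")]

def Spec_collect_numbers (data : List (String × String)) (out : List Int) : Prop := out = collect_numbers_alt data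
instance (data : List (String × String)) (out : List Int) : Decidable (Spec_collect_numbers data out) := by unfold Spec_collect_numbers; infer_instance

-- ===== CLAIM (what is proved, stated in full; the proofs are below) =====
def Claim_equal_collect_numbers : Prop := ∀ (data : List (String × String)), Dom_collect_numbers data → Pre_collect_numbers data → Spec_collect_numbers data (collect_numbers data)

-- ===== LEMMAS AND PROOFS =====

-- tagging an occurrence index with its target (explicit, to fix the Nat→Int cast's elaboration)
def tagT (t : List Char) (i : Nat) : List Char × Int := (t, (i : Int))

-- the indices ≥ k at which t starts in s, in increasing order (proof-side view of A's find loop)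
def occ (s t : List Char) (k : Nat) : List Nat :=
  if _h : k < s.length then
    (if t <+: s.drop k then [k] else []) ++ occ s t (k + 1)
  else []
termination_by s.length - k

lemma mem_occ (s t : List Char) (k i : Nat) :
    i ∈ occ s t k ↔ k ≤ i ∧ i < s.length ∧ t <+: s.drop i := by
  fun_induction occ s t k with
  | case1 k h ih =>
    rw [List.mem_append, ih]
    constructor
    · rintro (hm | ⟨h1, h2, h3⟩)
      · split at hm <;> simp_all
      · exact ⟨by omega, h2, h3⟩
    · rintro ⟨h1, h2, h3⟩
      by_cases hik : k = i
      · subst hik; simp [h3]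
      · exact Or.inr ⟨by omega, h2, h3⟩
  | case2 k h => simp; omega

lemma occ_eq_nil (s t : List Char) (k : Nat)
    (h : ∀ i, k ≤ i → i < s.length → ¬ t <+: s.drop i) : occ s t k = [] := by
  rw [List.eq_nil_iff_forall_not_mem]
  intro i hi
  rw [mem_occ] at hi
  exact h i hi.1 hi.2.1 hi.2.2

lemma occ_cons (s t : List Char) (k j : Nat) (hkj : k ≤ j) (hj : j < s.length)
    (hpre : t <+: s.drop j) (hmin : ∀ i, k ≤ i → i < j → ¬ t <+: s.drop i) :
    occ s t k = j :: occ s t (j + 1) := by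
  induction hd : j - k generalizing k with
  | zero =>
    have : k = j := by omega
    subst this
    rw [occ]
    simp [hj, hpre]
  | succ n ih =>
    rw [occ]
    have hk : k < s.length := by omega
    have : ¬ t <+: s.drop k := hmin k le_rfl (by omega)
    simp only [hk, dif_pos, this, if_neg, List.nil_append, not_false_iff]
    exact ih (k + 1) (by omega) (fun i h1 h2 => hmin i (by omega) h2) (by omega)

lemma occ_pairwise (s t : List Char) (k : Nat) : (occ s t k).Pairwise (· < ·) := by
  fun_induction occ s t k with
  | case1 k h ih =>
    rw [List.pairwise_append]
    refine ⟨?_, ih, ?_⟩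
    · split <;> simp
    · intro a ha b hb
      have hb' := (mem_occ s t (k + 1) b).mp hb
      have hak : a = k := by split at ha <;> simp_all
      omega
  | case2 k h => simp

lemma loop_spec (s t : List Char) (ht : t ≠ []) (fuel k : Nat) (hk : k ≤ s.length)
    (hf : s.length + 1 - k ≤ fuel) :
    findLoopA s t fuel (PySem.Chars.findFrom s t (k : Int) none)
      = (occ s t k).map (tagT t) := by
  induction fuel generalizing k with
  | zero => omega
  | succ fuel ih =>
    by_cases hneg : PySem.Chars.findFrom s t (k : Int) none = -1
    · rw [findLoopA, if_pos hneg, occ_eq_nil s t k ?_]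
      · rfl
      · intro i h1 h2 hpre
        apply (PySem.Chars.findFrom_natCast_eq_neg_one_iff s t k hk).mp hneg
        have hpre' : t <+: List.drop (i - k) (List.drop k s) := by
          rw [List.drop_drop, show k + (i - k) = i by omega]; exact hpre
        exact hpre'.isInfix.trans (List.drop_suffix (i - k) _).isInfix
    · obtain ⟨hkj, hpre, hmin⟩ := PySem.Chars.findFrom_natCast_spec s t k hk hneg
      set j : Int := PySem.Chars.findFrom s t (k : Int) none with hj
      have hjn : j = ((j.toNat : Nat) : Int) := by omega
      have hlt : j.toNat < s.length := by
        by_contra hcon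
        rw [List.drop_eq_nil_iff.mpr (by omega), List.prefix_nil] at hpre
        exact ht hpre
      rw [findLoopA, if_neg hneg]
      have harg : j + 1 = ((j.toNat + 1 : Nat) : Int) := by omega
      rw [harg, ih (j.toNat + 1) (by omega) (by omega)]
      rw [occ_cons s t k j.toNat (by omega) hlt hpre hmin]
      simp [tagT, List.map_cons, ← hjn]

-- facts about the literal token tables
lemma targets_ne_nil : ∀ t ∈ targetsA, t ≠ [] := by decide
lemma targets_nodup : targetsA.Nodup := by decide
lemma targets_eq : targetsA = tokensB.map Prod.fst := by decide
lemma tok_val : ∀ p ∈ tokensB, match_intA p.1 = some p.2 := by decide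
lemma no_prefix : ∀ t₁ ∈ targetsA, ∀ t₂ ∈ targetsA, t₁ <+: t₂ → t₁ = t₂ := by decide

-- at any position of any string, at most one target matches
lemma uniq_first (u : List Char) (t₁ t₂ : List Char) (h1 : t₁ ∈ targetsA) (h2 : t₂ ∈ targetsA)
    (p1 : t₁ <+: u) (p2 : t₂ <+: u) : t₁ = t₂ := by
  rcases List.prefix_or_prefix_of_prefix p1 p2 with h | h
  · exact no_prefix t₁ h1 t₂ h2 h
  · exact (no_prefix t₂ h2 t₁ h1 h).symm

-- the first token matching at index i, with its index (proof-side canonical occurrence list)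
def tokAt (s : List Char) (i : Nat) : Option ((List Char × Int) × Nat) :=
  (tokensB.find? (fun p => PySem.Chars.startswith (s.drop i) p.1)).map (fun p => (p, i))

def canon (s : List Char) : List (List Char × Int) :=
  (List.range s.length).filterMap (fun i => (tokAt s i).map (fun q => tagT q.1.1 q.2))

lemma mem_canon (s : List Char) (t : List Char) (z : Int) :
    (t, z) ∈ canon s ↔ ∃ i : Nat, i < s.length ∧ z = i ∧ t ∈ targetsA ∧ t <+: s.drop i := by
  unfold canon tokAt
  rw [List.mem_filterMap]
  constructor
  · rintro ⟨i, hi, hf⟩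
    rw [List.mem_range] at hi
    rcases hfind : tokensB.find? (fun p => PySem.Chars.startswith (s.drop i) p.1) with _ | p
    · rw [hfind] at hf; simp at hf
    · rw [hfind] at hf
      simp only [Option.map_some, Option.some_inj] at hf
      simp only [tagT, Prod.mk.injEq] at hf
      obtain ⟨rfl, rfl⟩ := hf
      refine ⟨i, hi, rfl, ?_, ?_⟩
      · rw [targets_eq]; exact List.mem_map_of_mem (List.mem_of_find?_eq_some hfind)
      · exact (PySem.Chars.startswith_iff _ _).mp (by simpa using List.find?_some hfind)
  · rintro ⟨i, hi, rfl, hmem, hpre⟩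
    refine ⟨i, List.mem_range.mpr hi, ?_⟩
    rw [targets_eq, List.mem_map] at hmem
    obtain ⟨p, hp, rfl⟩ := hmem
    have hsome : (tokensB.find? (fun p => PySem.Chars.startswith (s.drop i) p.1)).isSome := by
      rw [List.find?_isSome]
      exact ⟨p, hp, (PySem.Chars.startswith_iff _ _).mpr hpre⟩
    rcases hfind : tokensB.find? (fun p => PySem.Chars.startswith (s.drop i) p.1) with _ | q
    · rw [hfind] at hsome; simp at hsome
    · have hq1 : q.1 = p.1 := by
        apply uniq_first (s.drop i) q.1 p.1 _ _ _ hpre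
        · rw [targets_eq]; exact List.mem_map_of_mem (List.mem_of_find?_eq_some hfind)
        · rw [targets_eq]; exact List.mem_map_of_mem hp
        · exact (PySem.Chars.startswith_iff _ _).mp (by simpa using List.find?_some hfind)
      rw [hfind]
      simp [tagT, hq1]

lemma canon_pairwise (s : List Char) : (canon s).Pairwise (fun a b => a.2 < b.2) := by
  unfold canon
  rw [List.pairwise_filterMap]
  refine List.pairwise_lt_range.imp ?_
  intro a b hab x hx y hy
  unfold tokAt at hx hy
  rcases ha : tokensB.find? (fun p => PySem.Chars.startswith (s.drop a) p.1) with _ | p <;>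
    rw [ha] at hx <;> simp at hx
  rcases hb : tokensB.find? (fun p => PySem.Chars.startswith (s.drop b) p.1) with _ | q <;>
    rw [hb] at hy <;> simp at hy
  subst hx; subst hy
  simpa [tagT] using hab

lemma canon_nodup (s : List Char) : (canon s).Nodup :=
  (canon_pairwise s).imp (fun h he => by subst he; exact lt_irrefl _ h)

lemma flat_mem (s : List Char) (x : List Char × Int) :
    x ∈ targetsA.flatMap (fun t => (occ s t 0).map (tagT t)) ↔
      ∃ i : Nat, i < s.length ∧ x.2 = (i : Int) ∧ x.1 ∈ targetsA ∧ x.1 <+: s.drop i := by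
  rw [List.mem_flatMap]
  constructor
  · rintro ⟨t, hmem, hx⟩
    rw [List.mem_map] at hx
    obtain ⟨i, hiocc, rfl⟩ := hx
    obtain ⟨-, hlen, hpre⟩ := (mem_occ s t 0 i).mp hiocc
    exact ⟨i, hlen, rfl, hmem, hpre⟩
  · obtain ⟨t, z⟩ := x
    rintro ⟨i, hlen, hz, hmem, hpre⟩
    dsimp only at hz hmem hpre
    subst hz
    exact ⟨t, hmem, List.mem_map.mpr ⟨i, (mem_occ s t 0 i).mpr ⟨Nat.zero_le i, hlen, hpre⟩, rfl⟩⟩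

lemma flat_nodup (s : List Char) :
    (targetsA.flatMap (fun t => (occ s t 0).map (tagT t))).Nodup := by
  rw [List.nodup_flatMap]
  constructor
  · intro t _
    exact List.Nodup.map (f := tagT t) (fun a b hab => by simpa [tagT] using hab)
      ((occ_pairwise s t 0).imp fun h => Nat.ne_of_lt h)
  · refine targets_nodup.imp ?_
    intro t1 t2 hne x hx1 hx2
    rw [List.mem_map] at hx1 hx2
    obtain ⟨i1, -, rfl⟩ := hx1
    obtain ⟨i2, -, heq⟩ := hx2
    exact hne (congrArg Prod.fst heq).symm

lemma find_numbersA_eq_canon (s : List Char) : find_numbersA s = canon s := by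
  unfold find_numbersA
  rw [PySem.List.foldl_congr_mem _ _
        (fun acc t => acc ++ (occ s t 0).map (tagT t)) _ ?_]
  · rw [PySem.List.foldl_append_eq_flatMap, List.nil_append]
    apply PySem.List.sorted_eq_of_perm_of_pairwise_lt _ _ _ ?_ (canon_pairwise s)
    rw [List.perm_ext_iff_of_nodup (canon_nodup s) (flat_nodup s)]
    rintro ⟨t, z⟩
    rw [mem_canon, flat_mem]
  · intro acc t hmem
    congr 1
    have h0 : PySem.Chars.find s t = PySem.Chars.findFrom s t ((0 : Nat) : Int) none := by
      simp [PySem.Chars.findFrom_zero]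
    rw [h0, loop_spec s t (targets_ne_nil t hmem) (s.length + 1) 0 (Nat.zero_le _) (by omega)]

lemma wordScan_eq (l : List (List Char × Int)) (u : List Char) :
    wordScanB l u = (l.find? (fun p => PySem.Chars.startswith u p.1)).map (·.2) := by
  induction l with
  | nil => rfl
  | cons p rest ih =>
    obtain ⟨w, v⟩ := p
    rw [wordScanB]
    cases h : PySem.Chars.startswith u w <;> simp [h, ih]

lemma matchAtB_eq (s : List Char) (i : Nat) :
    matchAtB s i = (tokAt s i).map (fun q => (match_intA q.1.1).getD 0) := by
  unfold matchAtB tokAt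
  rw [wordScan_eq]
  rcases hfind : tokensB.find? (fun p => PySem.Chars.startswith (s.drop i) p.1) with _ | p
  · simp [hfind]
  · simp only [hfind, Option.map_some]
    rw [tok_val p (List.mem_of_find?_eq_some hfind)]
    rfl

lemma findSome?_map_comp {α β γ : Type} (l : List α) (h : α → Option β) (f : β → γ) :
    (l.findSome? h).map f = l.findSome? (fun a => (h a).map f) := by
  induction l with
  | nil => rfl
  | cons a l ih => rw [List.findSome?_cons, List.findSome?_cons]; cases h a <;> simp [ih]

lemma line_first (s : List Char) :
    ((find_numbersA s).head?).map (fun c => (match_intA c.1).getD 0)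
      = (List.range s.length).findSome? (matchAtB s) := by
  rw [find_numbersA_eq_canon]
  unfold canon
  rw [List.head?_filterMap, findSome?_map_comp]
  congr 1
  funext i
  rw [Option.map_map, matchAtB_eq]
  rfl

lemma line_last (s : List Char) :
    ((find_numbersA s).getLast?).map (fun c => (match_intA c.1).getD 0)
      = (List.range s.length).reverse.findSome? (matchAtB s) := by
  rw [find_numbersA_eq_canon]
  unfold canon
  rw [List.getLast?_eq_head?_reverse, ← List.filterMap_reverse, List.head?_filterMap,
      findSome?_map_comp]
  congr 1
  funext i
  rw [Option.map_map, matchAtB_eq]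
  rfl

-- ===== VERDICT (by name: the statement is the Claim_ definition above) =====
theorem collect_numbers_spec : Claim_equal_collect_numbers := by
  intro data _ _
  unfold Spec_collect_numbers collect_numbers collect_numbers_alt
  apply PySem.List.foldl_congr_mem
  intro acc kv _
  dsimp only
  rw [PySem.List.pyGet?_zero, PySem.List.pyGet?_neg_one, ← List.head?_eq_getElem?]
  have h1 := line_first kv.2.toList
  have h2 := line_last kv.2.toList
  cases hh : (find_numbersA kv.2.toList).head? with
  | none =>
    have hnil : find_numbersA kv.2.toList = [] := List.head?_eq_none_iff.mp hh
    rw [hnil] at h1 h2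
    simp only [List.head?_nil, List.getLast?_nil, Option.map_none] at h1 h2
    rw [hnil, List.getLast?_nil, ← h1, ← h2]
  | some c0 =>
    have hne : find_numbersA kv.2.toList ≠ [] := by
      intro hc
      rw [hc] at hh
      simp at hh
    obtain ⟨cl, hcl⟩ := Option.isSome_iff_exists.mp (List.getLast?_isSome.mpr hne)
    rw [hh] at h1
    rw [hcl] at h2
    simp only [Option.map_some] at h1 h2
    rw [hcl, ← h1, ← h2]
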